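-- pv_equiv track=rewrite | github.com/mgrone/stream1090 | other_utils/r82xx_gain_table.py | r82xx_gain_to_indices
-- ===== SOURCE A (Python) =====
-- LNA_STEPS = [
--     0, 9, 13, 40, 38, 13, 31, 22, 26, 31, 26, 14, 19, 5, 35, 13
-- ]
--
-- MIX_STEPS = [
--     0, 5, 10, 10, 19, 9, 10, 25, 17, 10, 8, 16, 13, 6, 3, -8
-- ]
--
-- def r82xx_gain_to_indices(requested_gain_tenth_db):
--     total = 0
--     lna = 0
--     mix = 0
--
--     for _ in range(15):
--         if total >= requested_gain_tenth_db:
--             break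
--
--         lna += 1
--         total += LNA_STEPS[lna]
--
--         if total >= requested_gain_tenth_db:
--             break
--
--         mix += 1
--         total += MIX_STEPS[mix]
--
--     return lna, mix
-- ===== SOURCE B (Python) =====
-- LNA_STEPS = [
--     0, 9, 13, 40, 38, 13, 31, 22, 26, 31, 26, 14, 19, 5, 35, 13
-- ]
--
-- MIX_STEPS = [
--     0, 5, 10, 10, 19, 9, 10, 25, 17, 10, 8, 16, 13, 6, 3, -8
-- ]
--
-- # Cumulative gains over the alternating step sequence LNA[1], MIX[1], ..., LNA[15], MIX[15].
-- _CUM = [0]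
-- for _i in range(1, 16):
--     _CUM.append(_CUM[-1] + LNA_STEPS[_i])
--     _CUM.append(_CUM[-1] + MIX_STEPS[_i])
--
-- def r82xx_gain_to_indices(requested_gain_tenth_db):
--     m = 0
--     while m < 30 and _CUM[m] < requested_gain_tenth_db:
--         m += 1
--     return (m + 1) // 2, m // 2
-- ===== Notes on version B (the rewrite author's own statement) =====
-- stated objective: simpler
-- what changed: Replaces the loop's two interleaved LNA/mixer counters, running total and dual break checks by a module-level precomputed cumulative-gain table over the alternating step sequence plus a single linear first-crossing scan, recovering the LNA index as half of m rounded up and the mixer index as half of m rounded down.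
import Mathlib
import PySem

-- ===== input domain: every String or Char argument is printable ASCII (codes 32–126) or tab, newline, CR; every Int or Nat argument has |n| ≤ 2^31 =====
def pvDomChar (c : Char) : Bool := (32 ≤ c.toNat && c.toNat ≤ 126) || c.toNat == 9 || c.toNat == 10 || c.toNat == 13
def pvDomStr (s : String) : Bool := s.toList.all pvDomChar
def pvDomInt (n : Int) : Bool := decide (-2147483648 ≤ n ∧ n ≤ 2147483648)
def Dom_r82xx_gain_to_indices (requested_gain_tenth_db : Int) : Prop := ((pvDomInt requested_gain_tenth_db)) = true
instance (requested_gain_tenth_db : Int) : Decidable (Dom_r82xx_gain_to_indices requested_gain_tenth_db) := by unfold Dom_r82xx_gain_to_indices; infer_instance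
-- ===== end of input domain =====

-- B replaces A's two interleaved counters and dual break checks by a precomputed cumulative-gain
-- table and a single linear first-crossing scan (objective: simpler decomposition, same cost).

-- ===== PORT A =====
def pvLNA_STEPS : List Int := [0, 9, 13, 40, 38, 13, 31, 22, 26, 31, 26, 14, 19, 5, 35, 13]
def pvMIX_STEPS : List Int := [0, 5, 10, 10, 19, 9, 10, 25, 17, 10, 8, 16, 13, 6, 3, -8]

-- the for-loop of A; lna/mix stay in 0..15 during the loop, so .toNat is exact and getD's default is unreachable
def pvALoop (req : Int) : Nat → Int → Int → Int → Int × Int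
  | 0, _, lna, mix => (lna, mix)
  | fuel+1, total, lna, mix =>
    if total ≥ req then (lna, mix)
    else
      let lna := lna + 1
      let total := total + pvLNA_STEPS.getD lna.toNat 0
      if total ≥ req then (lna, mix)
      else
        let mix := mix + 1
        let total := total + pvMIX_STEPS.getD mix.toNat 0
        pvALoop req fuel total lna mix

def r82xx_gain_to_indices (requested_gain_tenth_db : Int) : Int × Int :=
  pvALoop requested_gain_tenth_db 15 0 0 0

-- ===== PORT B =====
-- module-level cumulative table of Source B: _CUM built by appending the LNA then the MIX step for i = 1..15
def pvCUM : List Int :=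
  (List.range' 1 15).foldl
    (fun cum i =>
      let cum := cum ++ [(cum.getLast?.getD 0) + pvLNA_STEPS.getD i 0]
      cum ++ [(cum.getLast?.getD 0) + pvMIX_STEPS.getD i 0])
    [0]

-- the while loop of Source B: advance m while m < 30 and _CUM[m] < req (fuel = 30 - m renders the m < 30 bound)
def pvBScan (req : Int) : Nat → Nat → Nat
  | m, 0 => m
  | m, fuel+1 => if pvCUM.getD m 0 < req then pvBScan req (m+1) fuel else m

def r82xx_gain_to_indices_alt (requested_gain_tenth_db : Int) : Int × Int :=
  let m := pvBScan requested_gain_tenth_db 0 30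
  (((m + 1) / 2 : Nat), ((m / 2 : Nat) : Int))

-- ===== PRECONDITION & SPEC =====
def Spec_r82xx_gain_to_indices (requested_gain_tenth_db : Int) (out : Int × Int) : Prop := out = r82xx_gain_to_indices_alt requested_gain_tenth_db
instance (requested_gain_tenth_db : Int) (out : Int × Int) : Decidable (Spec_r82xx_gain_to_indices requested_gain_tenth_db out) := by unfold Spec_r82xx_gain_to_indices; infer_instance

-- ===== CLAIM (what is proved, stated in full; the proofs are below) =====
def Claim_equal_r82xx_gain_to_indices : Prop := ∀ (requested_gain_tenth_db : Int), Dom_r82xx_gain_to_indices requested_gain_tenth_db → Spec_r82xx_gain_to_indices requested_gain_tenth_db (r82xx_gain_to_indices requested_gain_tenth_db)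

-- ===== LEMMAS AND PROOFS =====
theorem pvCUM_eq : pvCUM = [0, 9, 14, 27, 37, 77, 87, 125, 144, 157, 166, 197, 207, 229, 254, 280, 297, 328, 338, 364, 372, 386, 402, 421, 434, 439, 445, 480, 483, 496, 488] := by decide

theorem pv_ite_swap {α : Type} (c r : Int) (a b : α) :
    (if c < r then a else b) = if r ≤ c then b else a := by
  by_cases h : r ≤ c
  · rw [if_pos h, if_neg (not_lt.mpr h)]
  · rw [if_neg h, if_pos (lt_of_not_ge h)]

-- the common normal form: the staircase of first-crossing answers by requested-gain interval
def pvChain (req : Int) : Int × Int :=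
  if req ≤ 0 then (0, 0) else if req ≤ 9 then (1, 0) else if req ≤ 14 then (1, 1) else
  if req ≤ 27 then (2, 1) else if req ≤ 37 then (2, 2) else if req ≤ 77 then (3, 2) else
  if req ≤ 87 then (3, 3) else if req ≤ 125 then (4, 3) else if req ≤ 144 then (4, 4) else
  if req ≤ 157 then (5, 4) else if req ≤ 166 then (5, 5) else if req ≤ 197 then (6, 5) else
  if req ≤ 207 then (6, 6) else if req ≤ 229 then (7, 6) else if req ≤ 254 then (7, 7) else
  if req ≤ 280 then (8, 7) else if req ≤ 297 then (8, 8) else if req ≤ 328 then (9, 8) else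
  if req ≤ 338 then (9, 9) else if req ≤ 364 then (10, 9) else if req ≤ 372 then (10, 10) else
  if req ≤ 386 then (11, 10) else if req ≤ 402 then (11, 11) else if req ≤ 421 then (12, 11) else
  if req ≤ 434 then (12, 12) else if req ≤ 439 then (13, 12) else if req ≤ 445 then (13, 13) else
  if req ≤ 480 then (14, 13) else if req ≤ 483 then (14, 14) else if req ≤ 496 then (15, 14) else
  (15, 15)

set_option maxHeartbeats 1000000 in
theorem pvA_eq (req : Int) : r82xx_gain_to_indices req = pvChain req := by
  simp only [r82xx_gain_to_indices, pvALoop, pvLNA_STEPS, pvMIX_STEPS, List.getD]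
  norm_num [pvChain, show Int.toNat 2 = 2 from rfl, show Int.toNat 3 = 3 from rfl,
    show Int.toNat 4 = 4 from rfl, show Int.toNat 5 = 5 from rfl, show Int.toNat 6 = 6 from rfl,
    show Int.toNat 7 = 7 from rfl, show Int.toNat 8 = 8 from rfl, show Int.toNat 9 = 9 from rfl,
    show Int.toNat 10 = 10 from rfl, show Int.toNat 11 = 11 from rfl,
    show Int.toNat 12 = 12 from rfl, show Int.toNat 13 = 13 from rfl,
    show Int.toNat 14 = 14 from rfl, show Int.toNat 15 = 15 from rfl]

set_option maxHeartbeats 1000000 in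
theorem pvB_eq (req : Int) : r82xx_gain_to_indices_alt req = pvChain req := by
  rw [Prod.ext_iff]
  constructor <;>
  · simp only [r82xx_gain_to_indices_alt, pvBScan, pvCUM_eq, List.getD]
    norm_num [pv_ite_swap, apply_ite (fun n : ℕ => n + 1), apply_ite (fun n : ℕ => n / 2),
      apply_ite (fun n : ℕ => (n : ℤ)), apply_ite (Prod.fst : ℤ × ℤ → ℤ),
      apply_ite (Prod.snd : ℤ × ℤ → ℤ), pvChain]

-- ===== VERDICT (by name: the statement is the Claim_ definition above) =====
theorem r82xx_gain_to_indices_spec : Claim_equal_r82xx_gain_to_indices := by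
  intro req _
  exact (pvA_eq req).trans (pvB_eq req).symm
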